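-- pv_equiv track=rewrite | github.com/creditimpact/finance-platform | backend/ai/note_style_stage.py | _sorted_emphasis
-- ===== SOURCE A (Python) =====
-- from typing import Any, Callable, Iterable, Iterator, Mapping, Sequence
--
-- def _sorted_emphasis(values: Any) -> list[str]:
--     if not isinstance(values, Sequence) or isinstance(values, (str, bytes, bytearray)):
--         return []
--
--     normalized: set[str] = set()
--     for entry in values:
--         text = _normalize_text(entry)
--         if text:
--             normalized.add(text)
--
--     return sorted(normalized)
--
-- def _normalize_text(value: Any) -> str:
--     if value is None:
--         return ""
--     if isinstance(value, str):
--         return value.strip()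
--     return str(value).strip()
-- ===== SOURCE B (Python) =====
-- from typing import Any, Sequence
-- from bisect import bisect_left
--
--
-- def _sorted_emphasis(values: Any) -> list[str]:
--     if not isinstance(values, Sequence) or isinstance(values, (str, bytes, bytearray)):
--         return []
--
--     result: list[str] = []
--     for entry in values:
--         if entry is None:
--             text = ""
--         elif isinstance(entry, str):
--             text = entry.strip()
--         else:
--             text = str(entry).strip()
--         if not text:
--             continue
--         # insert into the sorted, duplicate-free result at its position
--         i = bisect_left(result, text)
--         if i == len(result) or result[i] != text:
--             result.insert(i, text)
--     return result
-- ===== Notes on version B (the rewrite author's own statement) =====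
-- stated objective: alternative
-- what changed: Replaces A's hash-set accumulation plus a final sorted() call with a single pass that maintains a sorted duplicate-free result list, locating each normalized value's position with bisect_left and inserting it there unless already present; no set and no sort call remain.
import Mathlib
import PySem

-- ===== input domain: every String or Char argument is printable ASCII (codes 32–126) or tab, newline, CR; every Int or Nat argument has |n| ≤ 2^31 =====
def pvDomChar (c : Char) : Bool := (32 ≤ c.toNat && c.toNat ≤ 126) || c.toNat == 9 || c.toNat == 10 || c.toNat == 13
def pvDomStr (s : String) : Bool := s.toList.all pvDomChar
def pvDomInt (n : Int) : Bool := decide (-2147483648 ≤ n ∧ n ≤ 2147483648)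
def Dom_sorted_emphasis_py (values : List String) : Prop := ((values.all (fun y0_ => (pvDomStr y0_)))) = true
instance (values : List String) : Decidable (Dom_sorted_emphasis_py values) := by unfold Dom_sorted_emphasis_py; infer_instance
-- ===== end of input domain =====

-- B replaces A's hash-set + final sorted() with a single pass maintaining a sorted duplicate-free
-- result list, bisecting for each value's position and inserting unless already present (no set, no sort call).


-- ===== PORT A =====
-- values : List String always passes Python's Sequence/str-guard, and _normalize_text on a str is .strip()
def sorted_emphasis_py (values : List String) : List String :=
  let normalized : PySem.Set String :=
    values.foldl (fun s entry =>
      let text := PySem.Str.strip entry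
      if text ≠ "" then PySem.Set.add s text else s) PySem.Set.empty
  PySem.List.sorted normalized (fun x => x) false

-- ===== PORT B =====
-- Source B's insertion block: i = bisect_left(result, text); if i == len(result) or result[i] != text: result.insert(i, text)
def pyBisectInsert (result : List String) (text : String) : List String :=
  let i := PySem.List.bisectLeft result text
  if i = result.length ∨ PySem.List.pyGet? result (i : Int) ≠ some text then
    PySem.List.insert result (i : Int) text
  else result

def sorted_emphasis_py_alt (values : List String) : List String :=
  values.foldl (fun result entry =>
    let text := PySem.Str.strip entry
    if text ≠ "" then pyBisectInsert result text else result) []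

-- ===== PRECONDITION & SPEC =====
def Spec_sorted_emphasis_py (values : List String) (out : List String) : Prop := out = sorted_emphasis_py_alt values
instance (values : List String) (out : List String) : Decidable (Spec_sorted_emphasis_py values out) := by unfold Spec_sorted_emphasis_py; infer_instance

-- ===== CLAIM =====
def Claim_equal_sorted_emphasis_py : Prop := ∀ (values : List String), Dom_sorted_emphasis_py values → Spec_sorted_emphasis_py values (sorted_emphasis_py values)

-- ===== LEMMAS AND PROOFS =====

-- A's running set is exactly set(of the appended list of normalized non-empty values)
theorem fold_set_eq (values : List String) (acc : List String) :
    values.foldl (fun s entry =>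
      if PySem.Str.strip entry = "" then s else PySem.Set.add s (PySem.Str.strip entry))
      (PySem.Set.ofList acc)
    = PySem.Set.ofList (values.foldl (fun a entry =>
      if PySem.Str.strip entry = "" then a else a ++ [PySem.Str.strip entry]) acc) := by
  induction values generalizing acc with
  | nil => rfl
  | cons v vs ih =>
    simp only [List.foldl]
    by_cases h : PySem.Str.strip v = ""
    · simpa [h] using ih acc
    · have hadd : PySem.Set.add (PySem.Set.ofList acc) (PySem.Str.strip v)
          = PySem.Set.ofList (acc ++ [PySem.Str.strip v]) := by
        simp [PySem.Set.ofList_eq_foldl, List.foldl_append]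
      simpa [h, hadd] using ih (acc ++ [PySem.Str.strip v])

-- loop invariant of bisect_left's binary search, instantiated at String
theorem bisectLoop_inv (xs : List String) (x : String) (hs : xs.Pairwise (· ≤ ·)) :
    ∀ (fuel lo hi : Nat), lo ≤ hi → hi ≤ xs.length → hi - lo ≤ fuel →
    (∀ j, (hj : j < xs.length) → j < lo → xs[j] < x) →
    (∀ j, (hj : j < xs.length) → hi ≤ j → x ≤ xs[j]) →
    PySem.List.bisectLeftLoop xs x fuel lo hi ≤ xs.length ∧
    (∀ j, (hj : j < xs.length) → j < PySem.List.bisectLeftLoop xs x fuel lo hi → xs[j] < x) ∧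
    (∀ j, (hj : j < xs.length) → PySem.List.bisectLeftLoop xs x fuel lo hi ≤ j → x ≤ xs[j]) := by
  have hidx : ∀ i j, (hi : i < xs.length) → (hj : j < xs.length) → i < j → xs[i] ≤ xs[j] :=
    fun i j hi hj hij => (List.pairwise_iff_getElem.mp hs) i j hi hj hij
  intro fuel
  induction fuel with
  | zero =>
    intro lo hi hlohi hhil hfuel hlow hhigh
    have : lo = hi := by omega
    subst this
    simp only [PySem.List.bisectLeftLoop]
    exact ⟨hhil, fun j hj hjlo => hlow j hj hjlo, fun j hj hloj => hhigh j hj hloj⟩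
  | succ fuel ih =>
    intro lo hi hlohi hhil hfuel hlow hhigh
    by_cases hlt : lo < hi
    · have hmidlt : (lo + hi) / 2 < xs.length := by omega
      have hget : xs[(lo + hi) / 2]? = some (xs[(lo + hi) / 2]'hmidlt) := List.getElem?_eq_getElem hmidlt
      simp only [PySem.List.bisectLeftLoop, if_pos hlt, hget]
      by_cases hcmp : xs[(lo + hi) / 2]'hmidlt < x
      · simp only [if_pos hcmp]
        refine ih ((lo + hi) / 2 + 1) hi (by omega) hhil (by omega) ?_ hhigh
        intro j hj hjlt
        rcases Nat.lt_or_ge j ((lo + hi) / 2) with h | h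
        · exact lt_of_le_of_lt (hidx j _ hj hmidlt h) hcmp
        · have : j = (lo + hi) / 2 := by omega
          subst this; exact hcmp
      · simp only [if_neg hcmp]
        refine ih lo ((lo + hi) / 2) (by omega) (by omega) (by omega) hlow ?_
        intro j hj hjge
        have hx : x ≤ xs[(lo + hi) / 2]'hmidlt := le_of_not_gt hcmp
        rcases Nat.lt_or_ge ((lo + hi) / 2) j with h | h
        · exact le_trans hx (hidx _ j hmidlt hj h)
        · have : j = (lo + hi) / 2 := by omega
          subst this; exact hx
    · have : lo = hi := by omega
      subst this
      simp only [PySem.List.bisectLeftLoop, if_neg hlt]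
      exact ⟨hhil, fun j hj hjlo => hlow j hj hjlo, fun j hj hloj => hhigh j hj hloj⟩

theorem bisectLeft_spec_str (xs : List String) (x : String) (hs : xs.Pairwise (· ≤ ·)) :
    PySem.List.bisectLeft xs x ≤ xs.length ∧
    (∀ j, (hj : j < xs.length) → j < PySem.List.bisectLeft xs x → xs[j] < x) ∧
    (∀ j, (hj : j < xs.length) → PySem.List.bisectLeft xs x ≤ j → x ≤ xs[j]) := by
  have h := bisectLoop_inv xs x hs xs.length 0 xs.length (Nat.zero_le _) le_rfl (by omega)
    (fun j hj hj0 => absurd hj0 (Nat.not_lt_zero j)) (fun j hj hlen => absurd hj (by omega))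
  exact h

theorem mem_take_exists {l : List String} {n : Nat} {a : String} (h : a ∈ l.take n) :
    ∃ j, ∃ hj : j < l.length, j < n ∧ l[j] = a := by
  rcases List.mem_iff_getElem.mp h with ⟨j, hj, hja⟩
  have hjlen : j < l.length := by simp at hj; omega
  have hjn : j < n := by simp at hj; omega
  exact ⟨j, hjlen, hjn, by rw [← hja]; exact (List.getElem_take).symm⟩

theorem mem_drop_exists {l : List String} {n : Nat} {a : String} (h : a ∈ l.drop n) :
    ∃ j, ∃ hj : j < l.length, n ≤ j ∧ l[j] = a := by
  rcases List.mem_iff_getElem.mp h with ⟨j, hj, hja⟩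
  have hjlen : n + j < l.length := by simp at hj; omega
  exact ⟨n + j, hjlen, by omega, by rw [← hja]; exact (List.getElem_drop).symm⟩

theorem mem_bisectInsert (l : List String) (t a : String) (hp : l.Pairwise (· < ·)) :
    a ∈ pyBisectInsert l t ↔ a = t ∨ a ∈ l := by
  have hs : l.Pairwise (· ≤ ·) := hp.imp le_of_lt
  obtain ⟨hle, hlow, hhigh⟩ := bisectLeft_spec_str l t hs
  simp only [pyBisectInsert]
  split_ifs with hc
  · rw [PySem.List.insert_natCast l _ t hle]
    conv_rhs => rw [← List.take_append_drop (PySem.List.bisectLeft l t) l]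
    simp only [List.mem_append, List.mem_cons]
    tauto
  · push_neg at hc
    obtain ⟨hne, hget⟩ := hc
    have hlt : PySem.List.bisectLeft l t < l.length := lt_of_le_of_ne hle hne
    have : PySem.List.pyGet? l (PySem.List.bisectLeft l t : Int) = some (l[PySem.List.bisectLeft l t]'hlt) := by
      rw [PySem.List.pyGet?_natCast]; exact List.getElem?_eq_getElem hlt
    rw [this] at hget
    have htl : t ∈ l := by
      rw [← Option.some.inj hget]; exact List.getElem_mem hlt
    constructor
    · exact Or.inr
    · rintro (rfl | h); exact htl; exact h

theorem bisectInsert_pairwise (l : List String) (t : String) (hp : l.Pairwise (· < ·)) :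
    (pyBisectInsert l t).Pairwise (· < ·) := by
  have hs : l.Pairwise (· ≤ ·) := hp.imp le_of_lt
  obtain ⟨hle, hlow, hhigh⟩ := bisectLeft_spec_str l t hs
  simp only [pyBisectInsert]
  split_ifs with hc
  · -- inserted: result is take i ++ t :: drop i
    set i := PySem.List.bisectLeft l t with hi
    rw [PySem.List.insert_natCast l i t hle]
    -- strict upper part: t < l[j] for every i ≤ j < len
    have hstrict : ∀ j, (hj : j < l.length) → i ≤ j → t < l[j] := by
      intro j hj hij
      rcases hc with hc | hc
      · omega
      · have hilt : i < l.length := by omega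
        have hgeti : PySem.List.pyGet? l (i : Int) = some (l[i]'hilt) := by
          rw [PySem.List.pyGet?_natCast]; exact List.getElem?_eq_getElem hilt
        have hne : l[i]'hilt ≠ t := fun h => hc (by rw [hgeti, h])
        have hti : t < l[i]'hilt := lt_of_le_of_ne (hhigh i hilt le_rfl) (Ne.symm hne)
        rcases Nat.lt_or_ge i j with h | h
        · exact lt_trans hti ((List.pairwise_iff_getElem.mp hp) i j hilt hj h)
        · have : j = i := by omega
          subst this; exact hti
    have htake_lt : ∀ a ∈ l.take i, a < t := by
      intro a ha
      obtain ⟨j, hj, hji, rfl⟩ := mem_take_exists ha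
      exact hlow j hj hji
    have hdrop_gt : ∀ a ∈ l.drop i, t < a := by
      intro a ha
      obtain ⟨j, hj, hij, rfl⟩ := mem_drop_exists ha
      exact hstrict j hj hij
    refine List.pairwise_append.mpr ⟨hp.sublist (List.take_sublist ..), ?_, ?_⟩
    · exact List.pairwise_cons.mpr ⟨hdrop_gt, hp.sublist (List.drop_sublist ..)⟩
    · intro a ha b hb
      rcases List.mem_cons.mp hb with rfl | hb'
      · exact htake_lt a ha
      · exact lt_trans (htake_lt a ha) (hdrop_gt b hb')
  · exact hp

-- B's fold keeps the result sorted-strict and with exactly the members of the appended list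
theorem fold_bisect_inv (values : List String) :
    ∀ (acc1 acc2 : List String), acc1.Pairwise (· < ·) → (∀ a, a ∈ acc1 ↔ a ∈ acc2) →
    (values.foldl (fun r entry =>
        if PySem.Str.strip entry = "" then r else pyBisectInsert r (PySem.Str.strip entry)) acc1).Pairwise (· < ·) ∧
    (∀ a, a ∈ values.foldl (fun r entry =>
        if PySem.Str.strip entry = "" then r else pyBisectInsert r (PySem.Str.strip entry)) acc1
      ↔ a ∈ values.foldl (fun l entry =>
        if PySem.Str.strip entry = "" then l else l ++ [PySem.Str.strip entry]) acc2) := by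
  induction values with
  | nil => intro acc1 acc2 hp h; exact ⟨hp, h⟩
  | cons v vs ih =>
    intro acc1 acc2 hp h
    simp only [List.foldl]
    by_cases hv : PySem.Str.strip v = ""
    · rw [if_pos hv, if_pos hv]
      exact ih acc1 acc2 hp h
    · rw [if_neg hv, if_neg hv]
      refine ih _ _ (bisectInsert_pairwise _ _ hp) ?_
      intro b
      rw [mem_bisectInsert _ _ _ hp]
      simp only [List.mem_append, List.mem_singleton, h b]
      tauto

-- ===== VERDICT =====
theorem sorted_emphasis_py_spec : Claim_equal_sorted_emphasis_py := by
  intro values _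
  unfold Spec_sorted_emphasis_py sorted_emphasis_py sorted_emphasis_py_alt
  simp only [ne_eq, ite_not]
  set L : List String := values.foldl (fun a entry =>
      if PySem.Str.strip entry = "" then a else a ++ [PySem.Str.strip entry]) [] with hL
  have hfold : values.foldl (fun s entry =>
      if PySem.Str.strip entry = "" then s else PySem.Set.add s (PySem.Str.strip entry))
      PySem.Set.empty = PySem.Set.ofList L := by
    simpa using fold_set_eq values []
  rw [hfold]
  set R : List String := values.foldl (fun r entry =>
      if PySem.Str.strip entry = "" then r else pyBisectInsert r (PySem.Str.strip entry)) [] with hR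
  obtain ⟨hlt, hmem'⟩ := fold_bisect_inv values [] [] (by simp) (by simp)
  have hnd : R.Nodup := hlt.imp (fun h => ne_of_lt h)
  have hmem : ∀ a, a ∈ R ↔ a ∈ PySem.Set.ofList L := by
    intro a
    rw [PySem.Set.mem_ofList]
    exact hmem' a
  have hperm : R.Perm (PySem.Set.ofList L) :=
    (List.perm_ext_iff_of_nodup hnd (PySem.Set.nodup_ofList L)).mpr hmem
  exact PySem.List.sorted_eq_of_perm_of_pairwise_lt (PySem.Set.ofList L) R (fun x : String => x) hperm hlt
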